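-- pv_equiv track=rewrite | github.com/gh-xj/zeroclaw | scripts/release/generate_release_report.py | infer_core_handle
-- ===== SOURCE A (Python) =====
-- CORE_TEAM_ALIASES = {
--     "theonlyhennygod": {"argenis", "argenisdelarosa", "argenis de la rosa", "theonlyhennygod"},
--     "chumyin": {"chumyin", "chummy", "chum yin", "chumyin0912"},
--     "gh-xj": {"gh-xj", "ghxj", "xj", "xiangjun"},
-- }
--
-- def normalize_identity(value: str) -> str:
--     return "".join(char for char in value.lower() if char.isalnum())
--
-- def infer_core_handle(author_name: str, author_email: str) -> str | None:
--     tokens = {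
--         normalize_identity(author_name),
--         normalize_identity(author_email),
--         normalize_identity(author_email.split("@", 1)[0]),
--     }
--     for canonical, aliases in CORE_TEAM_ALIASES.items():
--         canonical_token = normalize_identity(canonical)
--         if canonical_token in tokens:
--             return canonical
--         for alias in aliases:
--             alias_token = normalize_identity(alias)
--             if alias_token and alias_token in tokens:
--                 return canonical
--     return None
-- ===== SOURCE B (Python) =====
-- CORE_TEAM_ALIASES = {
--     "theonlyhennygod": {"argenis", "argenisdelarosa", "argenis de la rosa", "theonlyhennygod"},
--     "chumyin": {"chumyin", "chummy", "chum yin", "chumyin0912"},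
--     "gh-xj": {"gh-xj", "ghxj", "xj", "xiangjun"},
-- }
--
-- def normalize_identity(value: str) -> str:
--     return "".join(char for char in value.lower() if char.isalnum())
--
-- # Reverse index: each non-empty normalized token -> its canonical handle
-- # (tokens are unique across teams, so first-wins insertion is immaterial).
-- _INDEX = {}
-- for _canonical, _aliases in CORE_TEAM_ALIASES.items():
--     for _raw in (_canonical, *_aliases):
--         _token = normalize_identity(_raw)
--         if _token and _token not in _INDEX:
--             _INDEX[_token] = _canonical
--
-- def infer_core_handle(author_name: str, author_email: str) -> str | None:
--     tokens = {
--         normalize_identity(author_name),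
--         normalize_identity(author_email),
--         normalize_identity(author_email.split("@", 1)[0]),
--     }
--     matches = {_INDEX[token] for token in tokens if token in _INDEX}
--     for canonical in CORE_TEAM_ALIASES:
--         if canonical in matches:
--             return canonical
--     return None
-- ===== Notes on version B (the rewrite author's own statement) =====
-- stated objective: idiomatic
-- what changed: B precomputes a reverse index mapping each non-empty normalized alias/canonical token to its canonical handle once at module load, then resolves a query by index lookups on the three tokens and a single pass over the canonical insertion order, replacing A's per-call nested scan over every team and alias.
import Mathlib
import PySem

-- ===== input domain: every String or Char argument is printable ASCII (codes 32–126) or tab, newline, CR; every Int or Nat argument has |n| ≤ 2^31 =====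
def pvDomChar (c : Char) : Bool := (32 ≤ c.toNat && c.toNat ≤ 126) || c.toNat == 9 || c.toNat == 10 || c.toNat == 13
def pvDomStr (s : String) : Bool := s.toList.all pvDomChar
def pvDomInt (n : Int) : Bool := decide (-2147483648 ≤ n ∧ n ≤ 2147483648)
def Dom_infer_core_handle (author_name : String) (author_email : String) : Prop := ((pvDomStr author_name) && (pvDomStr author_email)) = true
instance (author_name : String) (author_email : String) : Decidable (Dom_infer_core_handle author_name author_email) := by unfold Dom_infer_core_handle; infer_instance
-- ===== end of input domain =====

-- B replaces A's nested scan over teams and aliases by a precomputed reverse index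
-- (normalized token -> canonical) plus one pass over the canonical order; same return value.

-- shared module data: CORE_TEAM_ALIASES (dict of canonical -> set of aliases)
def CORE_TEAM_ALIASES : List (String × PySem.Set String) :=
  [("theonlyhennygod", PySem.Set.ofList ["argenis", "argenisdelarosa", "argenis de la rosa", "theonlyhennygod"]),
   ("chumyin", PySem.Set.ofList ["chumyin", "chummy", "chum yin", "chumyin0912"]),
   ("gh-xj", PySem.Set.ofList ["gh-xj", "ghxj", "xj", "xiangjun"])]

-- "".join(char for char in value.lower() if char.isalnum())
def normalize_identity (value : String) : String :=
  String.mk (((PySem.Str.lower value).toList).filter PySem.Chars.isalnum)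

-- ===== PORT A =====
-- inner loop: 'for alias in aliases: if alias_token and alias_token in tokens: return canonical'
def pvAliasLoop (tokens : PySem.Set String) (canonical : String) : List String → Option String
  | [] => none
  | al :: rest =>
    let aliasToken := normalize_identity al
    if aliasToken ≠ "" ∧ aliasToken ∈ tokens then some canonical
    else pvAliasLoop tokens canonical rest

-- outer loop: 'for canonical, aliases in CORE_TEAM_ALIASES.items(): …'
def pvTeamLoop (tokens : PySem.Set String) : List (String × PySem.Set String) → Option String
  | [] => none
  | (canonical, aliases) :: rest =>
    let canonicalToken := normalize_identity canonical
    if canonicalToken ∈ tokens then some canonical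
    else
      match pvAliasLoop tokens canonical aliases with
      | some c => some c
      | none => pvTeamLoop tokens rest

def infer_core_handle (author_name : String) (author_email : String) : Option String :=
  -- the .getD []/.headD "" defaults are unreachable: split with sep "@" ≠ "" returns some nonempty list
  let tokens : PySem.Set String := PySem.Set.ofList
    [normalize_identity author_name, normalize_identity author_email,
     normalize_identity (((PySem.Str.splitMax? author_email "@" 1).getD []).headD "")]
  pvTeamLoop tokens CORE_TEAM_ALIASES

-- ===== PORT B =====
-- module-level loop building _INDEX once (skip empty tokens, first insertion wins)
def pvIndex : PySem.Dict String String :=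
  CORE_TEAM_ALIASES.foldl (fun d p =>
    (p.1 :: (p.2 : List String)).foldl (fun d raw =>
      let token := normalize_identity raw
      if token ≠ "" ∧ ¬ (d.contains token = true) then d.insert token p.1 else d) d)
    PySem.Dict.empty

-- one step of the matches set comprehension: {_INDEX[t] for t in tokens if t in _INDEX}
def pvAddMatch (m : PySem.Set String) (t : String) : PySem.Set String :=
  match pvIndex.get? t with
  | some c => PySem.Set.add m c
  | none => m

-- 'for canonical in CORE_TEAM_ALIASES: if canonical in matches: return canonical'
def pvOrderLoop (ms : PySem.Set String) : List (String × PySem.Set String) → Option String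
  | [] => none
  | (canonical, _) :: rest =>
    if canonical ∈ ms then some canonical else pvOrderLoop ms rest

def infer_core_handle_alt (author_name : String) (author_email : String) : Option String :=
  let tokens : PySem.Set String := PySem.Set.ofList
    [normalize_identity author_name, normalize_identity author_email,
     normalize_identity (((PySem.Str.splitMax? author_email "@" 1).getD []).headD "")]
  let ms : PySem.Set String := tokens.foldl pvAddMatch PySem.Set.empty
  pvOrderLoop ms CORE_TEAM_ALIASES

-- ===== PRECONDITION & SPEC =====
def Spec_infer_core_handle (author_name : String) (author_email : String) (out : Option String) : Prop := out = infer_core_handle_alt author_name author_email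
instance (author_name : String) (author_email : String) (out : Option String) : Decidable (Spec_infer_core_handle author_name author_email out) := by unfold Spec_infer_core_handle; infer_instance

-- ===== CLAIM (what is proved, stated in full; the proofs are below) =====
def Claim_equal_infer_core_handle : Prop := ∀ (author_name : String) (author_email : String), Dom_infer_core_handle author_name author_email → Spec_infer_core_handle author_name author_email (infer_core_handle author_name author_email)

-- ===== LEMMAS AND PROOFS =====

set_option maxHeartbeats 2000000 in
theorem pvIndex_lit : pvIndex = PySem.Dict.mk
    [("theonlyhennygod", "theonlyhennygod"), ("argenis", "theonlyhennygod"), ("argenisdelarosa", "theonlyhennygod"),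
     ("chumyin", "chumyin"), ("chummy", "chumyin"), ("chumyin0912", "chumyin"),
     ("ghxj", "gh-xj"), ("xj", "gh-xj"), ("xiangjun", "gh-xj")] := by rfl

set_option maxHeartbeats 2000000 in
theorem CORE_lit : CORE_TEAM_ALIASES =
    [("theonlyhennygod", ["argenis", "argenisdelarosa", "argenis de la rosa", "theonlyhennygod"]),
     ("chumyin", ["chumyin", "chummy", "chum yin", "chumyin0912"]),
     ("gh-xj", ["gh-xj", "ghxj", "xj", "xiangjun"])] := by rfl

-- proof-side alias for lookup in the literal value of pvIndex (pvIndex_lit)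
def pvKeyFn (t : String) : Option String :=
  (PySem.Dict.mk
    [("theonlyhennygod", "theonlyhennygod"), ("argenis", "theonlyhennygod"), ("argenisdelarosa", "theonlyhennygod"),
     ("chumyin", "chumyin"), ("chummy", "chumyin"), ("chumyin0912", "chumyin"),
     ("ghxj", "gh-xj"), ("xj", "gh-xj"), ("xiangjun", "gh-xj")]).get? t

set_option maxHeartbeats 2000000 in
theorem pvIndex_get? (t : String) : pvIndex.get? t = pvKeyFn t := by
  rw [pvIndex_lit]; rfl

set_option maxHeartbeats 2000000 in
theorem mem_addMatch (m : PySem.Set String) (t c : String) :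
    c ∈ pvAddMatch m t ↔ c ∈ m ∨ pvKeyFn t = some c := by
  unfold pvAddMatch
  rw [pvIndex_get?]
  cases h : pvKeyFn t with
  | none => simp
  | some v => simp [PySem.Set.mem_add, eq_comm]

set_option maxHeartbeats 1000000 in
theorem matches_mem (ts : List String) (m0 : PySem.Set String) (c : String) :
    c ∈ ts.foldl pvAddMatch m0 ↔ c ∈ m0 ∨ ∃ n ∈ ts, pvKeyFn n = some c := by
  induction ts generalizing m0 with
  | nil => simp
  | cons t rest ih =>
    simp only [List.foldl_cons, ih, mem_addMatch, List.mem_cons]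
    constructor
    · rintro ((h | h) | ⟨n, hn, h⟩)
      · exact Or.inl h
      · exact Or.inr ⟨t, Or.inl rfl, h⟩
      · exact Or.inr ⟨n, Or.inr hn, h⟩
    · rintro (h | ⟨n, rfl | hn, h⟩)
      · exact Or.inl (Or.inl h)
      · exact Or.inl (Or.inr h)
      · exact Or.inr ⟨n, hn, h⟩

theorem key1 (n : String) : pvKeyFn n = some "theonlyhennygod" ↔
    ("theonlyhennygod" = n ∨ "argenis" = n ∨ "argenisdelarosa" = n) := by
  simp only [pvKeyFn, PySem.Dict.get?_mk_cons, beq_iff_eq]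
  split_ifs with h1 h2 h3 h4 h5 h6 h7 h8 h9
  · subst h1; decide
  · subst h2; decide
  · subst h3; decide
  · subst h4; decide
  · subst h5; decide
  · subst h6; decide
  · subst h7; decide
  · subst h8; decide
  · subst h9; decide
  · simp only [PySem.Dict.get?, List.find?]
    constructor
    · intro h; simp at h
    · rintro (h | h | h) <;> simp_all

theorem key2 (n : String) : pvKeyFn n = some "chumyin" ↔
    ("chumyin" = n ∨ "chummy" = n ∨ "chumyin0912" = n) := by
  simp only [pvKeyFn, PySem.Dict.get?_mk_cons, beq_iff_eq]
  split_ifs with h1 h2 h3 h4 h5 h6 h7 h8 h9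
  · subst h1; decide
  · subst h2; decide
  · subst h3; decide
  · subst h4; decide
  · subst h5; decide
  · subst h6; decide
  · subst h7; decide
  · subst h8; decide
  · subst h9; decide
  · simp only [PySem.Dict.get?, List.find?]
    constructor
    · intro h; simp at h
    · rintro (h | h | h) <;> simp_all

theorem key3 (n : String) : pvKeyFn n = some "gh-xj" ↔
    ("ghxj" = n ∨ "xj" = n ∨ "xiangjun" = n) := by
  simp only [pvKeyFn, PySem.Dict.get?_mk_cons, beq_iff_eq]
  split_ifs with h1 h2 h3 h4 h5 h6 h7 h8 h9
  · subst h1; decide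
  · subst h2; decide
  · subst h3; decide
  · subst h4; decide
  · subst h5; decide
  · subst h6; decide
  · subst h7; decide
  · subst h8; decide
  · subst h9; decide
  · simp only [PySem.Dict.get?, List.find?]
    constructor
    · intro h; simp at h
    · rintro (h | h | h) <;> simp_all

set_option maxHeartbeats 1000000 in
theorem nid1 : normalize_identity "theonlyhennygod" = "theonlyhennygod" := by decide
set_option maxHeartbeats 1000000 in
theorem nid2 : normalize_identity "argenis" = "argenis" := by decide
set_option maxHeartbeats 1000000 in
theorem nid3 : normalize_identity "argenisdelarosa" = "argenisdelarosa" := by decide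
set_option maxHeartbeats 1000000 in
theorem nid4 : normalize_identity "argenis de la rosa" = "argenisdelarosa" := by decide
set_option maxHeartbeats 1000000 in
theorem nid5 : normalize_identity "chumyin" = "chumyin" := by decide
set_option maxHeartbeats 1000000 in
theorem nid6 : normalize_identity "chummy" = "chummy" := by decide
set_option maxHeartbeats 1000000 in
theorem nid7 : normalize_identity "chum yin" = "chumyin" := by decide
set_option maxHeartbeats 1000000 in
theorem nid8 : normalize_identity "chumyin0912" = "chumyin0912" := by decide
set_option maxHeartbeats 1000000 in
theorem nid9 : normalize_identity "gh-xj" = "ghxj" := by decide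
set_option maxHeartbeats 1000000 in
theorem nid10 : normalize_identity "ghxj" = "ghxj" := by decide
set_option maxHeartbeats 1000000 in
theorem nid11 : normalize_identity "xj" = "xj" := by decide
set_option maxHeartbeats 1000000 in
theorem nid12 : normalize_identity "xiangjun" = "xiangjun" := by decide

set_option maxHeartbeats 2000000 in
theorem teamLoop_eq (T : PySem.Set String) :
    pvTeamLoop T CORE_TEAM_ALIASES =
      if ("theonlyhennygod" ∈ T ∨ "argenis" ∈ T ∨ "argenisdelarosa" ∈ T) then some "theonlyhennygod"
      else if ("chumyin" ∈ T ∨ "chummy" ∈ T ∨ "chumyin0912" ∈ T) then some "chumyin"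
      else if ("ghxj" ∈ T ∨ "xj" ∈ T ∨ "xiangjun" ∈ T) then some "gh-xj"
      else none := by
  rw [CORE_lit]
  simp only [pvTeamLoop, pvAliasLoop, nid1, nid2, nid3, nid4, nid5, nid6, nid7, nid8, nid9,
    nid10, nid11, nid12]
  norm_num
  split_ifs <;> simp_all

theorem orderLoop_eq (m : PySem.Set String) :
    pvOrderLoop m CORE_TEAM_ALIASES =
      if "theonlyhennygod" ∈ m then some "theonlyhennygod"
      else if "chumyin" ∈ m then some "chumyin"
      else if "gh-xj" ∈ m then some "gh-xj"
      else none := by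
  rw [CORE_lit]
  simp only [pvOrderLoop]

set_option maxHeartbeats 2000000 in
theorem pv_main (n1 n2 n3 : String) :
    pvTeamLoop (PySem.Set.ofList [n1, n2, n3]) CORE_TEAM_ALIASES =
      pvOrderLoop ((PySem.Set.ofList [n1, n2, n3]).foldl pvAddMatch PySem.Set.empty)
        CORE_TEAM_ALIASES := by
  rw [teamLoop_eq, orderLoop_eq]
  simp only [matches_mem, key1, key2, key3, PySem.Set.empty, List.not_mem_nil, false_or,
    List.mem_cons, exists_eq_or_imp, exists_eq_left, or_false, PySem.Set.mem_ofList]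
  split_ifs <;> tauto

-- ===== VERDICT (by name: the statement is the Claim_ definition above) =====
set_option maxHeartbeats 2000000 in
theorem infer_core_handle_spec : Claim_equal_infer_core_handle := by
  intro a e _
  unfold Spec_infer_core_handle infer_core_handle infer_core_handle_alt
  exact pv_main _ _ _
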